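-- pv_equiv track=rewrite | github.com/pxdrx/wealth.-Investing | forexfactory-ESSENCIAL/forexfactory-dashboard/backend/analysis/weekly_macro_narrative.py | apply_defensive_precedence
-- ===== SOURCE A (Python) =====
-- from typing import Any, Dict, List
--
-- _DEFENSIVE_ASSETS = ["XAUUSD", "XAGUSD"]
--
-- def apply_defensive_precedence(assets: List[str]) -> List[str]:
--     """
--     Aplica precedência de ativos defensivos (metais) quando regime é DEFENSIVE.
--     Promove XAUUSD e XAGUSD para o início da lista, se estiverem presentes.
--     Não remove nenhum ativo. Apenas reordena.
--     """
--     if not assets: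
--         return assets
--
--     defensive_found = []
--     other_assets = []
--
--     for asset in assets:
--         if asset in _DEFENSIVE_ASSETS:
--             defensive_found.append(asset)
--         else:
--             other_assets.append(asset)
--
--     # Reordenar: defensivos primeiro, depois os demais
--     return defensive_found + other_assets
-- ===== SOURCE B (Python) =====
-- from typing import List
--
-- _DEFENSIVE_ASSETS = ["XAUUSD", "XAGUSD"]
--
-- def apply_defensive_precedence(assets: List[str]) -> List[str]:
--     if not assets:
--         return assets
--     # Stable sort on a boolean key: defensive assets (key False) come first,
--     # and Timsort's stability preserves each group's original relative order.
--     return sorted(assets, key=lambda a: a not in _DEFENSIVE_ASSETS)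
-- ===== Notes on version B (the rewrite author's own statement) =====
-- stated objective: idiomatic
-- what changed: Replaced the two-accumulator partition loop with a single stable key-sort (sorted with a boolean 'not defensive' key), a sort-based strategy instead of a manual partition.
import Mathlib
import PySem

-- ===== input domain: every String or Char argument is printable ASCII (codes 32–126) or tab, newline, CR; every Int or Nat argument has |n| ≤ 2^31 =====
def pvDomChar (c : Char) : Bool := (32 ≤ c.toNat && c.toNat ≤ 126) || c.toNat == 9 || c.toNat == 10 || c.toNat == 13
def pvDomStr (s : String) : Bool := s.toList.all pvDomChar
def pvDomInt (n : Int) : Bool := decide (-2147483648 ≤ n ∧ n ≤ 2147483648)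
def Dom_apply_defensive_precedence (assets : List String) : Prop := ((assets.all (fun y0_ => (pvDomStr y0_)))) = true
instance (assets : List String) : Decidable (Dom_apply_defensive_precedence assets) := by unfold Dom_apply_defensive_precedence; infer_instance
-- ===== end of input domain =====

-- B replaces A's two-accumulator partition loop by a single stable sort on a
-- boolean key ("not defensive"), a more idiomatic sort-based formulation.

-- ===== PORT A =====
def defensiveAssets : List String := ["XAUUSD", "XAGUSD"]

def apply_defensive_precedence (assets : List String) : List String :=
  if assets = [] then assets
  else
    -- the loop with the two accumulators defensive_found / other_assets
    let acc := assets.foldl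
      (fun (acc : List String × List String) asset =>
        if asset ∈ defensiveAssets then (acc.1 ++ [asset], acc.2)
        else (acc.1, acc.2 ++ [asset]))
      ([], [])
    acc.1 ++ acc.2

-- ===== PORT B =====
-- Python's bool key (False < True) is ported as the Nat key 0/1, order-isomorphic.
def apply_defensive_precedence_alt (assets : List String) : List String :=
  if assets = [] then assets
  else PySem.List.sorted assets
    (fun a => if a ∈ defensiveAssets then (0 : Nat) else 1) false

-- ===== PRECONDITION & SPEC =====
def Spec_apply_defensive_precedence (assets : List String) (out : List String) : Prop := out = apply_defensive_precedence_alt assets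
instance (assets : List String) (out : List String) : Decidable (Spec_apply_defensive_precedence assets out) := by unfold Spec_apply_defensive_precedence; infer_instance

-- ===== CLAIM (what is proved, stated in full; the proofs are below) =====
def Claim_equal_apply_defensive_precedence : Prop := ∀ (assets : List String), Dom_apply_defensive_precedence assets → Spec_apply_defensive_precedence assets (apply_defensive_precedence assets)

-- ===== LEMMAS AND PROOFS =====

def pvKey (a : String) : Nat := if a ∈ defensiveAssets then 0 else 1

-- A's loop accumulates exactly the two filters.
theorem foldlA_eq (xs : List String) (d o : List String) :
    xs.foldl
      (fun (acc : List String × List String) asset =>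
        if asset ∈ defensiveAssets then (acc.1 ++ [asset], acc.2)
        else (acc.1, acc.2 ++ [asset])) (d, o)
    = (d ++ xs.filter (fun a => decide (a ∈ defensiveAssets)),
       o ++ xs.filter (fun a => decide (a ∉ defensiveAssets))) := by
  induction xs generalizing d o with
  | nil => simp
  | cons x t ih =>
    by_cases hx : x ∈ defensiveAssets <;>
      simp [List.foldl_cons, hx, ih, List.filter_cons]

-- Inserting a key-0 element into (zeros ++ ones) lands between the groups.
theorem insertBy_zero (x : String) (hx : pvKey x = 0)
    (A B : List String) (hA : ∀ a ∈ A, pvKey a = 0) (hB : ∀ b ∈ B, pvKey b = 1) :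
    PySem.List.insertBy (fun a b => decide (pvKey a < pvKey b)) x (A ++ B)
      = A ++ x :: B := by
  induction A with
  | nil =>
    cases B with
    | nil => simp [PySem.List.insertBy]
    | cons b bs =>
      have hb := hB b (by simp)
      simp [PySem.List.insertBy, hx, hb]
  | cons a as ih =>
    have ha := hA a (by simp)
    have : ¬ (pvKey x < pvKey a) := by omega
    simp [PySem.List.insertBy, this]
    exact ih (fun a h => hA a (by simp [h])) 

-- Inserting a key-1 element goes to the very end.
theorem insertBy_one (x : String) (hx : pvKey x = 1) (L : List String) :
    PySem.List.insertBy (fun a b => decide (pvKey a < pvKey b)) x L = L ++ [x] := by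
  induction L with
  | nil => simp [PySem.List.insertBy]
  | cons a as ih =>
    have : ¬ (pvKey x < pvKey a) := by
      rw [hx]; unfold pvKey; split <;> omega
    simp [PySem.List.insertBy, this, ih]

theorem foldl_insert_eq (xs : List String) (A B : List String)
    (hA : ∀ a ∈ A, pvKey a = 0) (hB : ∀ b ∈ B, pvKey b = 1) :
    xs.foldl (fun acc x => PySem.List.insertBy (fun a b => decide (pvKey a < pvKey b)) x acc) (A ++ B)
    = (A ++ xs.filter (fun a => decide (a ∈ defensiveAssets)))
      ++ (B ++ xs.filter (fun a => decide (a ∉ defensiveAssets))) := by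
  induction xs generalizing A B with
  | nil => simp
  | cons x t ih =>
    by_cases hx : x ∈ defensiveAssets
    · have h0 : pvKey x = 0 := by simp [pvKey, hx]
      rw [List.foldl_cons, insertBy_zero x h0 A B hA hB]
      have : A ++ x :: B = (A ++ [x]) ++ B := by simp
      rw [this, ih (A ++ [x]) B
        (by intro a ha; rcases List.mem_append.mp ha with h | h
            · exact hA a h
            · simp at h; simp [h, h0]) hB]
      simp [List.filter_cons, hx]
    · have h1 : pvKey x = 1 := by simp [pvKey, hx]
      rw [List.foldl_cons, insertBy_one x h1 (A ++ B)]
      have : (A ++ B) ++ [x] = A ++ (B ++ [x]) := by simp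
      rw [this, ih A (B ++ [x]) hA
        (by intro b hb; rcases List.mem_append.mp hb with h | h
            · exact hB b h
            · simp at h; simp [h, h1])]
      simp [List.filter_cons, hx]

theorem sorted_eq_partition (xs : List String) :
    PySem.List.sorted xs (fun a => if a ∈ defensiveAssets then (0 : Nat) else 1) false
    = xs.filter (fun a => decide (a ∈ defensiveAssets))
      ++ xs.filter (fun a => decide (a ∉ defensiveAssets)) := by
  have h := PySem.List.sorted_eq_foldl_insertBy xs pvKey
  have hk : (fun a => if a ∈ defensiveAssets then (0 : Nat) else 1) = pvKey := rfl
  rw [hk, h]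
  have := foldl_insert_eq xs [] [] (by simp) (by simp)
  simpa using this

-- ===== VERDICT (by name: the statement is the Claim_ definition above) =====
theorem apply_defensive_precedence_spec : Claim_equal_apply_defensive_precedence := by
  intro assets _
  unfold Spec_apply_defensive_precedence apply_defensive_precedence apply_defensive_precedence_alt
  by_cases h : assets = []
  · simp [h]
  · simp only [h, if_neg, reduceIte]
    rw [foldlA_eq, sorted_eq_partition]
    simp
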